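-- pv_equiv track=rewrite | github.com/ManotLuijiu/translation_tools | translation_tools/api/account_import.py | _sort_accounts_by_hierarchy
-- ===== SOURCE A (Python) =====
-- def _sort_accounts_by_hierarchy(accounts: list) -> list:
--     """
--     Sort accounts so that parent accounts are created before children.
--     Uses topological sort based on parent-child relationships.
--
--     Args:
--         accounts: List of account dictionaries
--
--     Returns:
--         list: Sorted list with parents before children
--     """
--     # Build lookup by account ID
--     account_lookup = {}
--     for acc in accounts:
--         acc_id = acc.get("ID", "").strip()
--         if acc_id:
--             account_lookup[acc_id] = acc
--
--     # Calculate depth for each account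
--     def get_depth(acc_id, visited=None):
--         if visited is None:
--             visited = set()
--
--         if acc_id in visited:
--             return 0  # Circular reference protection
--
--         visited.add(acc_id)
--
--         acc = account_lookup.get(acc_id)
--         if not acc:
--             return 0
--
--         parent_id = acc.get("Parent Account", "").strip()
--         if not parent_id or parent_id not in account_lookup:
--             return 0
--
--         return 1 + get_depth(parent_id, visited)
--
--     # Calculate depth for each account
--     depths = []
--     for acc in accounts:
--         acc_id = acc.get("ID", "").strip()
--         depth = get_depth(acc_id) if acc_id else 0
--         depths.append((depth, acc))
--
--     # Sort by depth (root accounts first)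
--     depths.sort(key=lambda x: x[0])
--
--     return [acc for _, acc in depths]
-- ===== SOURCE B (Python) =====
-- def _sort_accounts_by_hierarchy(accounts: list) -> list:
--     # Build id -> stripped parent-id map (last occurrence wins, like a dict overwrite)
--     parent_of = {}
--     for acc in accounts:
--         acc_id = acc.get("ID", "").strip()
--         if acc_id:
--             parent_of[acc_id] = acc.get("Parent Account", "").strip()
--
--     def depth_of(acc_id):
--         # iterative parent-chain walk with cycle protection
--         d = 0
--         seen = set()
--         cur = acc_id
--         while cur not in seen:
--             seen.add(cur)
--             p = parent_of.get(cur)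
--             if not p or p not in parent_of:
--                 break
--             d += 1
--             cur = p
--         return d
--
--     # Bucket accounts by depth and concatenate buckets in ascending depth:
--     # a stable counting sort (every depth is < len(accounts) + 2).
--     buckets = {}
--     for acc in accounts:
--         acc_id = acc.get("ID", "").strip()
--         d = depth_of(acc_id) if acc_id else 0
--         buckets.setdefault(d, []).append(acc)
--
--     out = []
--     for d in range(len(accounts) + 2):
--         out.extend(buckets.get(d, []))
--     return out
-- ===== Notes on version B (the rewrite author's own statement) =====
-- stated objective: alternative
-- what changed: B precomputes an id->parent-id map instead of A's id->full-dict lookup, computes each depth with an iterative while-loop chain walk instead of A's recursion, and replaces A's comparison sort by a stable bucket (counting) sort over depths, concatenating buckets in ascending depth.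
import Mathlib
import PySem

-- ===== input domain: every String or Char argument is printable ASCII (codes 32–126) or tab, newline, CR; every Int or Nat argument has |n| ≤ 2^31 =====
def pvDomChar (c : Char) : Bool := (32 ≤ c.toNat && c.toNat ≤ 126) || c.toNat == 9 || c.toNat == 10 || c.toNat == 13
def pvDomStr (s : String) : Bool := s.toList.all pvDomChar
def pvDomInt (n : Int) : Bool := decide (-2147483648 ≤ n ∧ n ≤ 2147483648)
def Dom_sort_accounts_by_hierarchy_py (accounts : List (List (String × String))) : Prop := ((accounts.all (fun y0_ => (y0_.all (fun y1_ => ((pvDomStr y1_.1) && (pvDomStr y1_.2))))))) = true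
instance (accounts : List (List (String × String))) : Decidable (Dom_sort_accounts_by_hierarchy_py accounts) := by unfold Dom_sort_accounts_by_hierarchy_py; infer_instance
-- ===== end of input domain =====

-- B replaces A's recursive depth computation by an iterative parent-chain walk over a
-- precomputed id -> parent-id map, and replaces the comparison sort by a stable bucket
-- (counting) sort on the depth; equivalence is about the return value only (A sorts a
-- list local to itself, no caller-visible mutation).

-- acc.get(k, "") on a Python dict modelled as an association list (first match)
def pvGet (acc : List (String × String)) (k : String) : String :=
  (PySem.Dict.mk acc).getD k ""

-- ===== PORT A =====
-- account_lookup: {id: acc} in insertion order, overwrite on duplicate ids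
def pvLookupA (accounts : List (List (String × String))) : PySem.Dict String (List (String × String)) :=
  accounts.foldl (fun d acc =>
    let accId := PySem.Str.strip (pvGet acc "ID")
    if accId ≠ "" then d.insert accId acc else d) PySem.Dict.empty

-- get_depth(acc_id, visited); fuel = accounts.length + 1 bounds the recursion depth
-- (every recursive step puts a fresh key of account_lookup into visited), so the
-- fuel-exhaustion branch is never reached on any input.
def pvGetDepthA (lookup : PySem.Dict String (List (String × String))) :
    Nat → String → PySem.Set String → Int
  | 0, _, _ => 0
  | fuel+1, accId, visited =>
    if PySem.Set.contains visited accId then 0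
    else
      let visited' := PySem.Set.add visited accId
      match lookup.get? accId with
      | none => 0
      | some acc =>
        if acc = [] then 0    -- 'if not acc'
        else
          let parentId := PySem.Str.strip (pvGet acc "Parent Account")
          if parentId = "" ∨ lookup.contains parentId = false then 0
          else 1 + pvGetDepthA lookup fuel parentId visited'

def sort_accounts_by_hierarchy_py (accounts : List (List (String × String))) : List (List (String × String)) :=
  let lookup := pvLookupA accounts
  let depths := accounts.map (fun acc =>
    let accId := PySem.Str.strip (pvGet acc "ID")
    ((if accId ≠ "" then pvGetDepthA lookup (accounts.length + 1) accId PySem.Set.empty else 0 : Int), acc))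
  (PySem.List.sorted depths (fun x => x.1)).map (fun x => x.2)

-- ===== PORT B =====
-- parent_of: {id: stripped parent id}, insertion order, overwrite on duplicate ids
def pvParentB (accounts : List (List (String × String))) : PySem.Dict String String :=
  accounts.foldl (fun d acc =>
    let accId := PySem.Str.strip (pvGet acc "ID")
    if accId ≠ "" then d.insert accId (PySem.Str.strip (pvGet acc "Parent Account")) else d) PySem.Dict.empty

-- depth_of's while loop; fuel = accounts.length + 1 bounds the iterations (every
-- iteration puts a fresh key of parent_of into seen), so the fuel-exhaustion branch
-- is never reached on any input.
def pvDepthB (pmap : PySem.Dict String String) :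
    Nat → String → Int → PySem.Set String → Int
  | 0, _, d, _ => d
  | fuel+1, cur, d, seen =>
    if PySem.Set.contains seen cur then d
    else
      let seen' := PySem.Set.add seen cur
      match pmap.get? cur with
      | none => d
      | some p =>
        if p = "" ∨ pmap.contains p = false then d
        else pvDepthB pmap fuel p (d + 1) seen'

def sort_accounts_by_hierarchy_py_alt (accounts : List (List (String × String))) : List (List (String × String)) :=
  let pmap := pvParentB accounts
  let buckets := accounts.foldl (fun b acc =>
    let accId := PySem.Str.strip (pvGet acc "ID")
    let d : Int := if accId ≠ "" then pvDepthB pmap (accounts.length + 1) accId 0 PySem.Set.empty else 0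
    b.modify d [] (fun xs => xs ++ [acc])) PySem.Dict.empty
  (PySem.List.pyRange 0 ((accounts.length : Int) + 2)).foldl (fun out d => out ++ buckets.getD d []) []

-- ===== PRECONDITION & SPEC =====
def Spec_sort_accounts_by_hierarchy_py (accounts : List (List (String × String))) (out : List (List (String × String))) : Prop := out = sort_accounts_by_hierarchy_py_alt accounts
instance (accounts : List (List (String × String))) (out : List (List (String × String))) : Decidable (Spec_sort_accounts_by_hierarchy_py accounts out) := by unfold Spec_sort_accounts_by_hierarchy_py; infer_instance

-- ===== CLAIM (what is proved, stated in full; the proofs are below) =====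
def Claim_equal_sort_accounts_by_hierarchy_py : Prop := ∀ (accounts : List (List (String × String))), Dom_sort_accounts_by_hierarchy_py accounts → Spec_sort_accounts_by_hierarchy_py accounts (sort_accounts_by_hierarchy_py accounts)

-- ===== LEMMAS AND PROOFS =====

-- The folds building account_lookup and parent_of keep the two dicts pointwise related.
theorem pv_fold_rel (accounts : List (List (String × String)))
    (d1 : PySem.Dict String (List (String × String))) (d2 : PySem.Dict String String)
    (hrel : ∀ x, d2.get? x = (d1.get? x).map (fun acc => PySem.Str.strip (pvGet acc "Parent Account"))) :
    ∀ x, (accounts.foldl (fun d acc =>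
        let accId := PySem.Str.strip (pvGet acc "ID")
        if accId ≠ "" then d.insert accId (PySem.Str.strip (pvGet acc "Parent Account")) else d) d2).get? x
      = ((accounts.foldl (fun d acc =>
        let accId := PySem.Str.strip (pvGet acc "ID")
        if accId ≠ "" then d.insert accId acc else d) d1).get? x).map
          (fun acc => PySem.Str.strip (pvGet acc "Parent Account")) := by
  induction accounts generalizing d1 d2 with
  | nil => exact hrel
  | cons a t ih =>
    intro x
    simp only [List.foldl_cons]
    apply ih
    intro y
    by_cases hid : PySem.Str.strip (pvGet a "ID") ≠ ""
    · simp only [if_pos hid, PySem.Dict.get?_insert]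
      split_ifs with hy
      · rfl
      · exact hrel y
    · simp only [if_neg hid]
      exact hrel y

theorem pv_maps_rel (accounts : List (List (String × String))) (x : String) :
    (pvParentB accounts).get? x =
      ((pvLookupA accounts).get? x).map (fun acc => PySem.Str.strip (pvGet acc "Parent Account")) := by
  exact pv_fold_rel accounts PySem.Dict.empty PySem.Dict.empty (by simp) x

theorem pv_contains_rel (accounts : List (List (String × String))) (p : String) :
    (pvParentB accounts).contains p = (pvLookupA accounts).contains p := by
  rw [PySem.Dict.contains_eq_isSome_get?, PySem.Dict.contains_eq_isSome_get?, pv_maps_rel]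
  simp

-- B's iterative walk computes d + (A's recursive depth), for any shared fuel.
theorem pv_depth_rel_gen (lookup : PySem.Dict String (List (String × String)))
    (pmap : PySem.Dict String String)
    (hrel : ∀ x, pmap.get? x = (lookup.get? x).map (fun acc => PySem.Str.strip (pvGet acc "Parent Account")))
    (hc : ∀ p, pmap.contains p = lookup.contains p) (fuel : Nat) :
    ∀ (cur : String) (seen : PySem.Set String) (d : Int),
      pvDepthB pmap fuel cur d seen = d + pvGetDepthA lookup fuel cur seen := by
  induction fuel with
  | zero => intro cur seen d; simp [pvDepthB, pvGetDepthA]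
  | succ n ih =>
    intro cur seen d
    simp only [pvDepthB, pvGetDepthA]
    rw [hrel cur]
    split_ifs with hs
    · simp
    · cases hg : lookup.get? cur with
      | none => simp
      | some acc =>
        simp only [Option.map_some]
        by_cases hnil : acc = []
        · subst hnil
          have hp : PySem.Str.strip (pvGet [] "Parent Account") = "" := by decide
          simp [hp]
        · simp only [if_neg hnil]
          rw [hc]
          by_cases hcond : PySem.Str.strip (pvGet acc "Parent Account") = "" ∨ lookup.contains (PySem.Str.strip (pvGet acc "Parent Account")) = false
          · simp [hcond]
          · simp only [if_neg hcond]
            rw [ih]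
            ring

theorem pv_depth_rel (accounts : List (List (String × String))) (fuel : Nat)
    (cur : String) (seen : PySem.Set String) (d : Int) :
    pvDepthB (pvParentB accounts) fuel cur d seen =
      d + pvGetDepthA (pvLookupA accounts) fuel cur seen :=
  pv_depth_rel_gen (pvLookupA accounts) (pvParentB accounts)
    (pv_maps_rel accounts) (pv_contains_rel accounts) fuel cur seen d

theorem pv_depthB_bounds (pmap : PySem.Dict String String) (fuel : Nat) :
    ∀ (cur : String) (seen : PySem.Set String) (d : Int),
      d ≤ pvDepthB pmap fuel cur d seen ∧ pvDepthB pmap fuel cur d seen ≤ d + fuel := by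
  induction fuel with
  | zero => intro cur seen d; simp [pvDepthB]
  | succ n ih =>
    intro cur seen d
    simp only [pvDepthB]
    split_ifs with hs
    · omega
    · cases hg : pmap.get? cur with
      | none => simp; omega
      | some p =>
        simp only
        split_ifs with hp
        · omega
        · have := ih p (PySem.Set.add seen cur) (d+1)
          omega

-- insertBy passes over a prefix it is not 'before'
theorem pv_insertBy_skip {α : Type} (before : α → α → Bool) (x : α) (A B : List α)
    (h : ∀ a ∈ A, before x a = false) :
    PySem.List.insertBy before x (A ++ B) = A ++ PySem.List.insertBy before x B := by
  induction A with
  | nil => simp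
  | cons a t ih =>
    have ha : before x a = false := h a (List.mem_cons_self)
    simp only [List.cons_append, PySem.List.insertBy, ha, Bool.false_eq_true, if_false]
    rw [ih (fun b hb => h b (List.mem_cons_of_mem a hb))]

-- insertBy stops in front of a list it is everywhere 'before'
theorem pv_insertBy_front {α : Type} (before : α → α → Bool) (x : α) (B : List α)
    (h : ∀ b ∈ B, before x b = true) :
    PySem.List.insertBy before x B = x :: B := by
  cases B with
  | nil => rfl
  | cons b t => simp [PySem.List.insertBy, h b List.mem_cons_self]

-- The stable sort by an Int key with values in [0, m) is bucket concatenation.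
theorem pv_sorted_eq_buckets {α : Type} (l : List (Int × α)) (m : Nat)
    (h : ∀ p ∈ l, 0 ≤ p.1 ∧ p.1 < (m : Int)) :
    PySem.List.sorted l (fun x => x.1) =
      (List.range m).flatMap (fun (k : Nat) => l.filter (fun p => p.1 == (k : Int))) := by
  induction l using List.reverseRecOn with
  | nil => simp [PySem.List.sorted_eq_foldl_insertBy]
  | append_singleton l' x ih =>
    have hl' : ∀ p ∈ l', 0 ≤ p.1 ∧ p.1 < (m : Int) :=
      fun p hp => h p (List.mem_append_left _ hp)
    obtain ⟨hx0, hxm⟩ := h x (List.mem_append_right _ List.mem_cons_self)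
    set k : Nat := x.1.toNat with hkdef
    have hxk : x.1 = (k : Int) := by omega
    have hkm : k + 1 ≤ m := by omega
    rw [PySem.List.sorted_eq_foldl_insertBy, List.foldl_append, List.foldl_cons, List.foldl_nil,
      ← PySem.List.sorted_eq_foldl_insertBy, ih hl']
    have hm : m = (k + 1) + (m - (k + 1)) := by omega
    set f : Nat → List (Int × α) := fun d => l'.filter (fun p => p.1 == (d : Int)) with hf
    set g : Nat → List (Int × α) := fun d => (l' ++ [x]).filter (fun p => p.1 == (d : Int)) with hg
    have hgf : ∀ d : Nat, g d = f d ++ (if x.1 = (d : Int) then [x] else []) := by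
      intro d
      simp only [hg, hf, List.filter_append]
      congr 1
      by_cases hb : x.1 = (d : Int) <;> simp [hb]
    rw [hm, List.range_add, List.flatMap_append, List.flatMap_append, List.flatMap_map,
      List.flatMap_map]
    have hhigh : (List.range (m - (k+1))).flatMap (fun a => g ((k+1) + a)) =
        (List.range (m - (k+1))).flatMap (fun a => f ((k+1) + a)) := by
      apply List.flatMap_congr
      intro j _
      rw [hgf, if_neg, List.append_nil]
      rw [hxk]
      intro hc
      have := Nat.cast_inj.mp hc
      omega
    have hlow : (List.range (k+1)).flatMap g = (List.range (k+1)).flatMap f ++ [x] := by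
      rw [List.range_succ, List.flatMap_append, List.flatMap_append]
      have h1 : (List.range k).flatMap g = (List.range k).flatMap f := by
        apply List.flatMap_congr
        intro j hj
        have hjk : j < k := List.mem_range.mp hj
        rw [hgf, if_neg, List.append_nil]
        rw [hxk]
        intro hc
        have := Nat.cast_inj.mp hc
        omega
      have h2 : g k = f k ++ [x] := by
        rw [hgf, if_pos hxk]
      rw [h1]
      simp only [List.flatMap_cons, List.flatMap_nil, List.append_nil, h2, List.append_assoc]
    rw [hhigh, hlow]
    rw [pv_insertBy_skip]
    · rw [pv_insertBy_front]
      · simp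
      · intro b hb
        simp only [List.mem_flatMap, List.mem_range, List.mem_filter, beq_iff_eq, hf] at hb
        obtain ⟨j, hj, _, hb1⟩ := hb
        simp only [decide_eq_true_eq, hxk, hb1]
        have : k < (k+1) + j := by omega
        exact_mod_cast this
    · intro a ha
      simp only [List.mem_flatMap, List.mem_range, List.mem_filter, beq_iff_eq, hf] at ha
      obtain ⟨d, hd, _, had⟩ := ha
      simp only [decide_eq_false_iff_not, not_lt, hxk, had]
      have : d ≤ k := by omega
      exact_mod_cast this

-- ===== VERDICT (by name: the statement is the Claim_ definition above) =====
theorem sort_accounts_by_hierarchy_py_spec : Claim_equal_sort_accounts_by_hierarchy_py := by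
  intro accounts _
  unfold Spec_sort_accounts_by_hierarchy_py sort_accounts_by_hierarchy_py sort_accounts_by_hierarchy_py_alt
  simp only []
  -- the B-side key of each account
  set keyB : List (String × String) → Int := fun acc =>
    if PySem.Str.strip (pvGet acc "ID") ≠ "" then
      pvDepthB (pvParentB accounts) (accounts.length + 1) (PySem.Str.strip (pvGet acc "ID")) 0 PySem.Set.empty
    else 0 with hkeyB
  -- A's (depth, acc) pairs are B's pairs
  have hpairs : (accounts.map (fun acc =>
      ((if PySem.Str.strip (pvGet acc "ID") ≠ "" then pvGetDepthA (pvLookupA accounts) (accounts.length + 1) (PySem.Str.strip (pvGet acc "ID")) PySem.Set.empty else 0 : Int), acc)))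
      = accounts.map (fun acc => (keyB acc, acc)) := by
    apply List.map_congr_left
    intro acc _
    simp only [hkeyB]
    split_ifs with hid
    · rw [pv_depth_rel]; simp
    · rfl
  rw [hpairs]
  set l := accounts.map (fun acc => (keyB acc, acc)) with hl
  -- B's bucket fold is the pair-list fold
  have hfold : (accounts.foldl (fun b acc =>
      b.modify (keyB acc) [] (fun xs => xs ++ [acc])) PySem.Dict.empty)
      = l.foldl (fun b p => b.modify p.1 [] (fun xs => xs ++ [p.2])) PySem.Dict.empty := by
    rw [hl, List.foldl_map]
  -- B's final loop is bucket concatenation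
  rw [PySem.List.foldl_append_eq_flatMap, List.nil_append]
  have hrange : PySem.List.pyRange 0 ((accounts.length : Int) + 2)
      = (List.range (accounts.length + 2)).map (fun k : Nat => (k : Int)) := by
    rw [show ((accounts.length : Int) + 2) = ((accounts.length + 2 : Nat) : Int) by push_cast; ring]
    exact PySem.List.pyRange_zero_natCast _
  rw [hrange, List.flatMap_map, hfold]
  -- key bounds
  have hbound : ∀ p ∈ l, 0 ≤ p.1 ∧ p.1 < ((accounts.length + 2 : Nat) : Int) := by
    intro p hp
    rw [hl] at hp
    obtain ⟨acc, _, rfl⟩ := List.mem_map.mp hp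
    dsimp only
    simp only [hkeyB]
    split_ifs with hid
    · have := pv_depthB_bounds (pvParentB accounts) (accounts.length + 1)
        (PySem.Str.strip (pvGet acc "ID")) PySem.Set.empty 0
      push_cast
      omega
    · push_cast
      exact ⟨trivial, by positivity⟩
  rw [pv_sorted_eq_buckets l (accounts.length + 2) hbound, List.map_flatMap]
  apply List.flatMap_congr
  intro k _
  rw [PySem.Dict.getD_foldl_modify_append]
  simp [PySem.Dict.getD_empty]
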